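-- pv_equiv track=rewrite | github.com/AdrianSuliga/WDI | 04 - Zadania z tablicami jednowymiarowymi/ex_13.py | lookForReverse
-- ===== SOURCE A (Python) =====
-- def lookForReverse(T, n):
--     maxLen, len = 0, 2
--     while len < n:
--         for i in range(n-len+1):
--             Seq = [0 for _ in range(len)]
--             pSq = 0
--             for j in range(i, i+len):
--                 Seq[pSq] = T[j]
--                 pSq += 1
--             if containsSeq(T, n, Seq, len):
--                 maxLen = len
--                 break
--         len += 1
--     return maxLen
--
-- def containsSeq(T, n, S, k):
--     flag = True
--     for i in range(n-1, -1, -1):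
--         if T[i] == S[0] and i-k >= -1:
--             pS = 0
--             for j in range(i, i-k, -1):
--                 if T[j] != S[pS]:
--                     flag = False
--                     break
--                 pS += 1
--             if flag: return True
--             flag = True
--     return False
-- ===== SOURCE B (Python) =====
-- def lookForReverse(T, n):
--     # DP over pairs (i, j): ext(i, j) = longest L with T[i+s] == T[j-s] for s < L,
--     # computed row by row via ext(i, j) = 1 + ext(i+1, j-1); answer = min(max ext, n-1),
--     # thresholded at 2, matching the brute-force search over window lengths.
--     if n < 3:
--         return 0
--     best = 0
--     nxt = [0] * n
--     for i in range(n - 1, -1, -1):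
--         cur = [0] * n
--         for j in range(n):
--             if T[i] == T[j]:
--                 cur[j] = 1 + (nxt[j - 1] if j >= 1 else 0)
--                 if cur[j] > best:
--                     best = cur[j]
--         nxt = cur
--     return min(best, n - 1) if best >= 2 else 0
-- ===== Notes on version B (the rewrite author's own statement) =====
-- stated objective: faster
-- what changed: A enumerates every window length and start and rescans the whole array for a reversed occurrence of each window; B runs one O(n^2) dynamic program over position pairs (longest match of T read forward against T read backward, row by row), then caps the maximum at n-1 and thresholds at 2.
import Mathlib
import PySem

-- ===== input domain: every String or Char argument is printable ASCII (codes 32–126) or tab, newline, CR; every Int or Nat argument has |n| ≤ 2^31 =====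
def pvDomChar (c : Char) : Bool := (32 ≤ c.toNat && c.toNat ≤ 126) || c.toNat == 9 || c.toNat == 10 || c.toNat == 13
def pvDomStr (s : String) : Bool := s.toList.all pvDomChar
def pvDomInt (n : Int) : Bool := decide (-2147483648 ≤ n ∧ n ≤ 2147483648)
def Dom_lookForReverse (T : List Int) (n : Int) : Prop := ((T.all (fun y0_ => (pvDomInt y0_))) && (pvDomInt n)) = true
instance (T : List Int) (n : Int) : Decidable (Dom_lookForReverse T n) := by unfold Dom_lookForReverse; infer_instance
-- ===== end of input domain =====

-- B replaces A's search over all window lengths and positions by one O(n^2) DP over pairs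
-- of positions (longest match of a forward window against a backward occurrence), for speed.

-- Python indexing T[i] (all uses are in range under Pre_)
def pyG (xs : List Int) (i : Int) : Int := PySem.List.pyGetD xs i 0

-- ===== PORT A =====
-- inner loop of containsSeq: for j in range(i, i-k, -1), stop = i-k
def csInner (T S : List Int) (stop : Int) (j pS : Int) : Bool :=
  if stop < j then
    if pyG T j ≠ pyG S pS then false
    else csInner T S stop (j - 1) (pS + 1)
  else true
termination_by (j - stop).toNat
decreasing_by omega

-- outer loop of containsSeq: for i in range(n-1, -1, -1)
def csOuter (T S : List Int) (n k : Int) (i : Int) : Bool :=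
  if 0 ≤ i then
    if pyG T i = pyG S 0 ∧ i - k ≥ -1 then
      if csInner T S (i - k) i 0 then true
      else csOuter T S n k (i - 1)
    else csOuter T S n k (i - 1)
  else false
termination_by (i + 1).toNat
decreasing_by all_goals omega

def containsSeq (T : List Int) (n : Int) (S : List Int) (k : Int) : Bool :=
  csOuter T S n k (n - 1)

-- Seq-building loop: for j in range(i, i+len): Seq[pSq] = T[j]; pSq += 1
def buildSeq (T : List Int) (stop : Int) (j : Int) (Seq : List Int) (pSq : Int) : List Int × Int :=
  if j < stop then buildSeq T stop (j + 1) (PySem.List.pySetD Seq pSq (pyG T j)) (pSq + 1)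
  else (Seq, pSq)
termination_by (stop - j).toNat
decreasing_by omega

-- for i in range(n-len+1): … break sets maxLen = len and leaves the loop
def lfrFor (T : List Int) (n len : Int) (i maxLen : Int) : Int :=
  if i < n - len + 1 then
    if containsSeq T n (buildSeq T (i + len) i (List.replicate len.toNat 0) 0).1 len then len
    else lfrFor T n len (i + 1) maxLen
  else maxLen
termination_by (n - len + 1 - i).toNat
decreasing_by omega

-- while len < n
def lfrWhile (T : List Int) (n : Int) (len maxLen : Int) : Int :=
  if len < n then lfrWhile T n (len + 1) (lfrFor T n len 0 maxLen)
  else maxLen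
termination_by (n - len).toNat
decreasing_by omega

def lookForReverse (T : List Int) (n : Int) : Int := lfrWhile T n 2 0

-- ===== PORT B =====
-- inner row loop: for j in range(n)
def innerB (T nxt : List Int) (n i : Int) (j : Int) (cur : List Int) (best : Int) : List Int × Int :=
  if j < n then
    if pyG T i = pyG T j then
      let v := 1 + (if 1 ≤ j then pyG nxt (j - 1) else 0)
      innerB T nxt n i (j + 1) (PySem.List.pySetD cur j v) (if v > best then v else best)
    else innerB T nxt n i (j + 1) cur best
  else (cur, best)
termination_by (n - j).toNat
decreasing_by all_goals omega

-- outer loop: for i in range(n-1, -1, -1)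
def outerB (T : List Int) (n : Int) (i : Int) (nxt : List Int) (best : Int) : Int :=
  if 0 ≤ i then
    let p := innerB T nxt n i 0 (List.replicate n.toNat 0) best
    outerB T n (i - 1) p.1 p.2
  else best
termination_by (i + 1).toNat
decreasing_by omega

def lookForReverse_alt (T : List Int) (n : Int) : Int :=
  if n < 3 then 0
  else
    let best := outerB T n (n - 1) (List.replicate n.toNat 0) 0
    if best ≥ 2 then min best (n - 1) else 0

-- ===== PRECONDITION & SPEC =====
-- A raises IndexError exactly when n ≥ 3 and n exceeds len(T); Pre_ excludes only those inputs.
def Pre_lookForReverse (T : List Int) (n : Int) : Prop := n < 3 ∨ n ≤ (T.length : Int)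
instance (T : List Int) (n : Int) : Decidable (Pre_lookForReverse T n) := by
  unfold Pre_lookForReverse; infer_instance

def pvWitness_lookForReverse : List Int × Int := ([1, 2, 3, 2, 1], 5)

def Spec_lookForReverse (T : List Int) (n : Int) (out : Int) : Prop := out = lookForReverse_alt T n
instance (T : List Int) (n : Int) (out : Int) : Decidable (Spec_lookForReverse T n out) := by
  unfold Spec_lookForReverse; infer_instance

-- ===== CLAIM (what is proved, stated in full; the proofs are below) =====
def Claim_equal_lookForReverse : Prop := ∀ (T : List Int) (n : Int), Dom_lookForReverse T n → Pre_lookForReverse T n → Spec_lookForReverse T n (lookForReverse T n)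

-- ===== LEMMAS AND PROOFS =====

-- ext T n i j: length of the longest match T[i+s] = T[j-s] (s = 0,1,…) staying inside [·,n) × [0,·)
def ext (T : List Int) (n : Int) (i j : Int) : Int :=
  if i < n ∧ 0 ≤ j then
    if pyG T i = pyG T j then 1 + ext T n (i + 1) (j - 1) else 0
  else 0
termination_by (n - i).toNat
decreasing_by all_goals omega

lemma ext_nonneg (T : List Int) (n i j : Int) : 0 ≤ ext T n i j := by
  fun_induction ext T n i j <;> omega

lemma ext_ge_iff (T : List Int) (n : Int) (L : Nat) : ∀ i j : Int,
    ((L : Int) ≤ ext T n i j ↔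
      ∀ s : Int, 0 ≤ s → s < (L : Int) →
        i + s < n ∧ 0 ≤ j - s ∧ pyG T (i + s) = pyG T (j - s)) := by
  induction L with
  | zero =>
    intro i j
    constructor
    · intro _ s hs0 hs; exact absurd hs (by push_cast; omega)
    · intro _; exact_mod_cast ext_nonneg T n i j
  | succ L ih =>
    intro i j
    rw [ext]
    by_cases h1 : i < n ∧ 0 ≤ j
    · rw [if_pos h1]
      by_cases h2 : pyG T i = pyG T j
      · rw [if_pos h2]
        have hrec := ih (i + 1) (j - 1)
        constructor
        · intro hle s hs0 hs
          by_cases h0 : s = 0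
          · subst h0; exact ⟨by omega, by omega, by simpa using h2⟩
          · have hle' : (L : Int) ≤ ext T n (i + 1) (j - 1) := by push_cast at hle ⊢; omega
            obtain ⟨ha, hb, hc⟩ := hrec.mp hle' (s - 1) (by omega) (by push_cast at hs ⊢; omega)
            refine ⟨by omega, by omega, ?_⟩
            have e1 : i + 1 + (s - 1) = i + s := by ring
            have e2 : j - 1 - (s - 1) = j - s := by ring
            rwa [e1, e2] at hc
        · intro hall
          have : (L : Int) ≤ ext T n (i + 1) (j - 1) := by
            refine hrec.mpr ?_
            intro s hs0 hs
            have := hall (s + 1) (by omega) (by push_cast; omega)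
            have e1 : i + (s + 1) = i + 1 + s := by ring
            have e2 : j - (s + 1) = j - 1 - s := by ring
            rw [e1, e2] at this
            exact ⟨this.1, this.2.1, this.2.2⟩
          push_cast; omega
      · rw [if_neg h2]
        constructor
        · intro hle; exact absurd hle (by push_cast; omega)
        · intro hall
          exact absurd (by simpa using (hall 0 le_rfl (by push_cast; omega)).2.2) h2
    · rw [if_neg h1]
      constructor
      · intro hle; exact absurd hle (by push_cast; omega)
      · intro hall
        have := hall 0 le_rfl (by push_cast; omega)
        exact absurd (by omega : i < n ∧ 0 ≤ j) h1

-- characterisation of A's inner scan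
lemma csInner_iff (T S : List Int) (stop : Int) : ∀ fuel : Nat, ∀ j pS,
    (j - stop).toNat = fuel →
    (csInner T S stop j pS = true ↔
      ∀ s : Int, 0 ≤ s → s < j - stop → pyG T (j - s) = pyG S (pS + s)) := by
  intro fuel
  induction fuel with
  | zero =>
    intro j pS hf
    rw [csInner]
    simp only [if_neg (by omega : ¬ stop < j)]
    constructor
    · intro _ s hs0 hs; omega
    · intro _; trivial
  | succ f ih =>
    intro j pS hf
    rw [csInner]
    simp only [if_pos (by omega : stop < j)]
    by_cases hm : pyG T j = pyG S pS
    · rw [if_neg (show ¬ (pyG T j ≠ pyG S pS) by simpa using hm)]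
      rw [ih (j - 1) (pS + 1) (by omega)]
      constructor
      · intro hall s hs0 hs
        by_cases h0 : s = 0
        · subst h0; simpa using hm
        · have := hall (s - 1) (by omega) (by omega)
          have e1 : j - 1 - (s - 1) = j - s := by ring
          have e2 : pS + 1 + (s - 1) = pS + s := by ring
          rwa [e1, e2] at this
      · intro hall s hs0 hs
        have := hall (s + 1) (by omega) (by omega)
        have e1 : j - (s + 1) = j - 1 - s := by ring
        have e2 : pS + (s + 1) = pS + 1 + s := by ring
        rwa [e1, e2] at this
    · rw [if_pos hm]
      simp only [Bool.false_eq_true, false_iff]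
      intro hall
      exact hm (by simpa using hall 0 le_rfl (by omega))

lemma csOuter_iff (T S : List Int) (n k : Int) : ∀ fuel : Nat, ∀ i,
    (i + 1).toNat = fuel →
    (csOuter T S n k i = true ↔
      ∃ e, 0 ≤ e ∧ e ≤ i ∧ pyG T e = pyG S 0 ∧ -1 ≤ e - k ∧ csInner T S (e - k) e 0 = true) := by
  intro fuel
  induction fuel with
  | zero =>
    intro i hf
    rw [csOuter]
    rw [if_neg (by omega : ¬ 0 ≤ i)]
    simp only [Bool.false_eq_true, false_iff]
    rintro ⟨e, he0, hei, -⟩; omega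
  | succ f ih =>
    intro i hf
    rw [csOuter]
    rw [if_pos (by omega : 0 ≤ i)]
    by_cases hc : pyG T i = pyG S 0 ∧ i - k ≥ -1
    · rw [if_pos hc]
      by_cases hin : csInner T S (i - k) i 0 = true
      · rw [if_pos hin]
        simp only [true_iff]
        exact ⟨i, by omega, le_rfl, hc.1, by omega, hin⟩
      · rw [if_neg hin, ih (i - 1) (by omega)]
        constructor
        · rintro ⟨e, he0, hei, h3, h4, h5⟩; exact ⟨e, he0, by omega, h3, h4, h5⟩
        · rintro ⟨e, he0, hei, h3, h4, h5⟩
          refine ⟨e, he0, ?_, h3, h4, h5⟩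
          rcases eq_or_lt_of_le hei with he | he
          · exact absurd (he ▸ h5) hin
          · omega
    · rw [if_neg hc, ih (i - 1) (by omega)]
      constructor
      · rintro ⟨e, he0, hei, h3, h4, h5⟩; exact ⟨e, he0, by omega, h3, h4, h5⟩
      · rintro ⟨e, he0, hei, h3, h4, h5⟩
        refine ⟨e, he0, ?_, h3, h4, h5⟩
        rcases eq_or_lt_of_le hei with he | he
        · exact absurd (by exact he ▸ ⟨h3, by omega⟩ : pyG T i = pyG S 0 ∧ i - k ≥ -1) hc
        · omega

lemma pyG_set (Seq : List Int) (q p v : Int) (hq0 : 0 ≤ q) (hq : q < (Seq.length : Int))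
    (hp0 : 0 ≤ p) :
    pyG (PySem.List.pySetD Seq q v) p = if p = q then v else pyG Seq p := by
  have hq' : q = ((q.toNat : Nat) : Int) := by omega
  have hp' : p = ((p.toNat : Nat) : Int) := by omega
  unfold pyG
  rw [hq', hp', PySem.List.pyGetD_pySetD_natCast Seq q.toNat p.toNat v 0 (by omega)]
  simp only [Int.toNat_of_nonneg hq0, Int.toNat_of_nonneg hp0]
  split_ifs with h1 h2 h2 <;> first | rfl | omega

-- the built window reads back as T shifted by the window start
lemma buildSeq_spec (T : List Int) (stop : Int) : ∀ fuel : Nat, ∀ j Seq pSq,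
    (stop - j).toNat = fuel → 0 ≤ pSq → pSq + (stop - j) ≤ (Seq.length : Int) →
    ∀ p : Int, 0 ≤ p →
      pyG (buildSeq T stop j Seq pSq).1 p =
        if pSq ≤ p ∧ p < pSq + (stop - j) then pyG T (j + (p - pSq)) else pyG Seq p := by
  intro fuel
  induction fuel with
  | zero =>
    intro j Seq pSq hf h0 hlen p hp0
    rw [buildSeq, if_neg (by omega : ¬ j < stop), if_neg (by omega)]
  | succ f ih =>
    intro j Seq pSq hf h0 hlen p hp0
    have hjs : j < stop := by omega
    rw [buildSeq, if_pos hjs]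
    have hlen' : ((PySem.List.pySetD Seq pSq (pyG T j)).length : Int) = (Seq.length : Int) := by
      rw [PySem.List.length_pySetD]
    rw [ih (j + 1) _ (pSq + 1) (by omega) (by omega) (by omega) p hp0]
    by_cases hin : pSq + 1 ≤ p ∧ p < pSq + 1 + (stop - (j + 1))
    · rw [if_pos hin, if_pos (by omega)]
      congr 1; ring
    · rw [if_neg hin]
      rw [pyG_set Seq pSq p (pyG T j) (by omega) (by omega) hp0]
      by_cases hpq : p = pSq
      · rw [if_pos hpq, if_pos (by omega)]
        subst hpq
        congr 1; ring
      · rw [if_neg hpq, if_neg (by omega)]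

-- PairGe T n L: some forward window of length L matches some backward occurrence, inside [0,n)
def PairGe (T : List Int) (n L : Int) : Prop :=
  ∃ i j, 0 ≤ i ∧ i < n ∧ 0 ≤ j ∧ j < n ∧ L ≤ ext T n i j

lemma containsSeq_window_iff (T : List Int) (n len w : Int) (h1 : 1 ≤ len) (hw : 0 ≤ w)
    (hwn : w < n - len + 1) :
    containsSeq T n (buildSeq T (w + len) w (List.replicate len.toNat 0) 0).1 len = true ↔
      ∃ e, 0 ≤ e ∧ e ≤ n - 1 ∧ len - 1 ≤ e ∧
        ∀ s : Int, 0 ≤ s → s < len → pyG T (w + s) = pyG T (e - s) := by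
  have hseq : ∀ p : Int, 0 ≤ p → p < len →
      pyG (buildSeq T (w + len) w (List.replicate len.toNat 0) 0).1 p = pyG T (w + p) := by
    intro p hp0 hpl
    rw [buildSeq_spec T (w + len) (w + len - w).toNat w _ 0 rfl le_rfl
        (by rw [List.length_replicate]; omega) p hp0]
    rw [if_pos (by omega)]
    congr 1; ring
  unfold containsSeq
  rw [csOuter_iff T _ n len (n - 1 + 1).toNat (n - 1) rfl]
  constructor
  · rintro ⟨e, he0, hen, hfirst, hek, hin⟩
    rw [csInner_iff T _ (e - len) (e - (e - len)).toNat e 0 rfl] at hin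
    refine ⟨e, he0, hen, by omega, ?_⟩
    intro s hs0 hsl
    have := hin s hs0 (by omega)
    rw [show (0 : Int) + s = s from by ring] at this
    rw [hseq s hs0 hsl] at this
    exact this.symm
  · rintro ⟨e, he0, hen, hel, hall⟩
    refine ⟨e, he0, hen, ?_, by omega, ?_⟩
    · rw [hseq 0 le_rfl (by omega)]
      rw [show w + 0 = w from by ring]
      have := hall 0 le_rfl (by omega)
      rw [show w + 0 = w from by ring, show e - 0 = e from by ring] at this
      exact this.symm
    · rw [csInner_iff T _ (e - len) (e - (e - len)).toNat e 0 rfl]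
      intro s hs0 hsl
      rw [show (0 : Int) + s = s from by ring, hseq s hs0 (by omega)]
      exact (hall s hs0 (by omega)).symm

lemma found_iff_pairGe (T : List Int) (n len : Int) (h1 : 1 ≤ len) :
    (∃ w, 0 ≤ w ∧ w < n - len + 1 ∧
        containsSeq T n (buildSeq T (w + len) w (List.replicate len.toNat 0) 0).1 len = true) ↔
      PairGe T n len := by
  have hcast : ((len.toNat : Nat) : Int) = len := by omega
  constructor
  · rintro ⟨w, hw0, hwn, hcs⟩
    rw [containsSeq_window_iff T n len w h1 hw0 hwn] at hcs
    obtain ⟨e, he0, hen, hel, hall⟩ := hcs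
    refine ⟨w, e, hw0, by omega, he0, by omega, ?_⟩
    rw [← hcast, ext_ge_iff]
    intro s hs0 hs
    rw [hcast] at hs
    exact ⟨by omega, by omega, hall s hs0 hs⟩
  · rintro ⟨i, j, hi0, hin, hj0, hjn, hext⟩
    rw [← hcast, ext_ge_iff] at hext
    have hbound := fun (s : Int) (hs0 : 0 ≤ s) (hs : s < len) =>
      hext s hs0 (by omega)
    have hlast := hbound (len - 1) (by omega) (by omega)
    refine ⟨i, hi0, by omega, ?_⟩
    rw [containsSeq_window_iff T n len i h1 hi0 (by omega)]
    exact ⟨j, hj0, by omega, by omega, fun s hs0 hs => (hbound s hs0 hs).2.2⟩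

lemma lfrFor_found (T : List Int) (n len : Int) : ∀ fuel : Nat, ∀ i m,
    (n - len + 1 - i).toNat = fuel →
    (∃ w, i ≤ w ∧ w < n - len + 1 ∧
        containsSeq T n (buildSeq T (w + len) w (List.replicate len.toNat 0) 0).1 len = true) →
    lfrFor T n len i m = len := by
  intro fuel
  induction fuel with
  | zero =>
    rintro i m hf ⟨w, hiw, hwn, -⟩
    omega
  | succ f ih =>
    rintro i m hf ⟨w, hiw, hwn, hcs⟩
    rw [lfrFor, if_pos (by omega : i < n - len + 1)]
    by_cases hc : containsSeq T n (buildSeq T (i + len) i (List.replicate len.toNat 0) 0).1 len = true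
    · rw [if_pos hc]
    · rw [if_neg hc]
      have hwi : w ≠ i := fun h => hc (h ▸ hcs)
      exact ih (i + 1) m (by omega) ⟨w, by omega, hwn, hcs⟩

lemma lfrFor_notfound (T : List Int) (n len : Int) : ∀ fuel : Nat, ∀ i m,
    (n - len + 1 - i).toNat = fuel →
    (¬ ∃ w, i ≤ w ∧ w < n - len + 1 ∧
        containsSeq T n (buildSeq T (w + len) w (List.replicate len.toNat 0) 0).1 len = true) →
    lfrFor T n len i m = m := by
  intro fuel
  induction fuel with
  | zero =>
    intro i m hf hno
    rw [lfrFor, if_neg (by omega : ¬ i < n - len + 1)]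
  | succ f ih =>
    intro i m hf hno
    by_cases hi : i < n - len + 1
    · rw [lfrFor, if_pos hi]
      rw [if_neg (fun hc => hno ⟨i, le_rfl, hi, hc⟩)]
      exact ih (i + 1) m (by omega) (fun ⟨w, hiw, hwn, hcs⟩ => hno ⟨w, by omega, hwn, hcs⟩)
    · rw [lfrFor, if_neg hi]

-- row and grid maxima of ext (what B's loops maintain)
def rowMax (T : List Int) (n i : Int) (j : Int) : Int :=
  if j < n then max (ext T n i j) (rowMax T n i (j + 1)) else 0
termination_by (n - j).toNat
decreasing_by omega

def gridMax (T : List Int) (n : Int) (i : Int) : Int :=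
  if 0 ≤ i then max (rowMax T n i 0) (gridMax T n (i - 1)) else 0
termination_by (i + 1).toNat
decreasing_by omega

lemma rowMax_nonneg (T : List Int) (n i j : Int) : 0 ≤ rowMax T n i j := by
  fun_induction rowMax T n i j <;> omega

lemma gridMax_nonneg (T : List Int) (n i : Int) : 0 ≤ gridMax T n i := by
  fun_induction gridMax T n i <;> omega

lemma le_rowMax (T : List Int) (n i : Int) : ∀ fuel : Nat, ∀ j j', (n - j).toNat = fuel →
    j ≤ j' → j' < n → ext T n i j' ≤ rowMax T n i j := by
  intro fuel
  induction fuel with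
  | zero => intro j j' hf hjj hj'; omega
  | succ f ih =>
    intro j j' hf hjj hj'
    rw [rowMax, if_pos (by omega : j < n)]
    rcases eq_or_lt_of_le hjj with h | h
    · subst h; exact le_max_left _ _
    · exact le_max_of_le_right (ih (j + 1) j' (by omega) (by omega) hj')

lemma le_gridMax (T : List Int) (n : Int) : ∀ fuel : Nat, ∀ i i', (i + 1).toNat = fuel →
    0 ≤ i' → i' ≤ i → i' < n →
    ∀ j, 0 ≤ j → j < n → ext T n i' j ≤ gridMax T n i := by
  intro fuel
  induction fuel with
  | zero => intro i i' hf h0 hii hi' j hj0 hjn; omega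
  | succ f ih =>
    intro i i' hf h0 hii hi' j hj0 hjn
    rw [gridMax, if_pos (by omega : 0 ≤ i)]
    rcases eq_or_lt_of_le hii with h | h
    · subst h; exact le_max_of_le_left (le_rowMax T n i' (n - 0).toNat 0 j rfl hj0 hjn)
    · exact le_max_of_le_right (ih (i - 1) i' (by omega) h0 (by omega) hi' j hj0 hjn)

lemma rowMax_attained (T : List Int) (n i : Int) : ∀ fuel : Nat, ∀ j, (n - j).toNat = fuel →
    rowMax T n i j = 0 ∨ ∃ j', j ≤ j' ∧ j' < n ∧ rowMax T n i j = ext T n i j' := by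
  intro fuel
  induction fuel with
  | zero =>
    intro j hf
    rw [rowMax, if_neg (by omega : ¬ j < n)]
    exact Or.inl rfl
  | succ f ih =>
    intro j hf
    rw [rowMax, if_pos (by omega : j < n)]
    rcases le_total (rowMax T n i (j + 1)) (ext T n i j) with h | h
    · exact Or.inr ⟨j, le_rfl, by omega, max_eq_left h⟩
    · rw [max_eq_right h]
      rcases ih (j + 1) (by omega) with h0 | ⟨j', hjj, hj', he⟩
      · exact Or.inl h0
      · exact Or.inr ⟨j', by omega, hj', he⟩

lemma gridMax_attained (T : List Int) (n : Int) : ∀ fuel : Nat, ∀ i, (i + 1).toNat = fuel →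
    gridMax T n i = 0 ∨ ∃ i' j, 0 ≤ i' ∧ i' ≤ i ∧ 0 ≤ j ∧ j < n ∧ gridMax T n i = ext T n i' j := by
  intro fuel
  induction fuel with
  | zero =>
    intro i hf
    rw [gridMax, if_neg (by omega : ¬ 0 ≤ i)]
    exact Or.inl rfl
  | succ f ih =>
    intro i hf
    rw [gridMax, if_pos (by omega : 0 ≤ i)]
    rcases le_total (gridMax T n (i - 1)) (rowMax T n i 0) with h | h
    · rw [max_eq_left h]
      rcases rowMax_attained T n i (n - 0).toNat 0 rfl with h0 | ⟨j', hjj, hj', he⟩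
      · exact Or.inl h0
      · exact Or.inr ⟨i, j', by omega, le_rfl, by omega, hj', he⟩
    · rw [max_eq_right h]
      rcases ih (i - 1) (by omega) with h0 | ⟨i', j', hi0, hii, hj0, hjn, he⟩
      · exact Or.inl h0
      · exact Or.inr ⟨i', j', hi0, by omega, hj0, hjn, he⟩

lemma pairGe_iff_le_grid (T : List Int) (n L : Int) (h1 : 1 ≤ L) :
    PairGe T n L ↔ L ≤ gridMax T n (n - 1) := by
  constructor
  · rintro ⟨i, j, hi0, hin, hj0, hjn, hext⟩
    exact le_trans hext (le_gridMax T n (n - 1 + 1).toNat (n - 1) i rfl hi0 (by omega) hin j hj0 hjn)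
  · intro hle
    rcases gridMax_attained T n (n - 1 + 1).toNat (n - 1) rfl with h0 | ⟨i', j', hi0, hii, hj0, hjn, he⟩
    · omega
    · exact ⟨i', j', hi0, by omega, hj0, hjn, by omega⟩

lemma pyG_replicate (k : Nat) (p : Int) (hp : 0 ≤ p) : pyG (List.replicate k (0 : Int)) p = 0 := by
  have hp' : p = ((p.toNat : Nat) : Int) := by omega
  rw [pyG, hp', PySem.List.pyGetD_natCast, List.getD_eq_getElem?_getD]
  by_cases h : p.toNat < k
  · simp [h]
  · simp [h]

lemma innerB_spec (T : List Int) (n i : Int) (hi : i < n) : ∀ fuel : Nat, ∀ j nxt cur best,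
    (n - j).toNat = fuel → 0 ≤ j → 0 ≤ best → (cur.length : Int) = n →
    (∀ p : Int, 0 ≤ p → p < n → pyG nxt p = ext T n (i + 1) p) →
    (∀ p : Int, 0 ≤ p → p < j → pyG cur p = ext T n i p) →
    (∀ p : Int, j ≤ p → pyG cur p = 0) →
    (innerB T nxt n i j cur best).2 = max best (rowMax T n i j) ∧
      (∀ p : Int, 0 ≤ p → p < n → pyG (innerB T nxt n i j cur best).1 p = ext T n i p) := by
  intro fuel
  induction fuel with
  | zero =>
    intro j nxt cur best hf hj0 hb0 hlen hnxt hcur hcur0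
    rw [innerB, if_neg (by omega : ¬ j < n)]
    rw [rowMax, if_neg (by omega : ¬ j < n)]
    exact ⟨by omega, fun p hp0 hpn => hcur p hp0 (by omega)⟩
  | succ f ih =>
    intro j nxt cur best hf hj0 hb0 hlen hnxt hcur hcur0
    have hjn : j < n := by omega
    rw [innerB, if_pos hjn]
    rw [rowMax, if_pos hjn]
    by_cases hm : pyG T i = pyG T j
    · rw [if_pos hm]
      have hv : (1 + (if 1 ≤ j then pyG nxt (j - 1) else 0)) = ext T n i j := by
        rw [ext, if_pos (by omega : i < n ∧ 0 ≤ j), if_pos hm]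
        by_cases hj1 : 1 ≤ j
        · rw [if_pos hj1, hnxt (j - 1) (by omega) (by omega)]
        · rw [if_neg hj1]
          have hj : j = 0 := by omega
          subst hj
          rw [ext, if_neg (by omega)]
      set v := 1 + (if 1 ≤ j then pyG nxt (j - 1) else 0) with hvdef
      have hrec := ih (j + 1) nxt (PySem.List.pySetD cur j v) (if v > best then v else best)
        (by omega) (by omega) (by rcases le_or_gt v best with h | h <;> simp [h] <;> omega)
        (by rw [PySem.List.length_pySetD]; exact hlen)
        hnxt
        (fun p hp0 hpj => by
          rw [pyG_set cur j p v hj0 (by omega) hp0]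
          by_cases hpq : p = j
          · rw [if_pos hpq, hpq, hv]
          · rw [if_neg hpq]; exact hcur p hp0 (by omega))
        (fun p hpj => by
          rw [pyG_set cur j p v hj0 (by omega) (by omega)]
          rw [if_neg (by omega)]
          exact hcur0 p (by omega))
      refine ⟨?_, hrec.2⟩
      rw [hrec.1, hv]
      have h1 : (if v > best then v else best) = max best v := by
        rcases le_or_gt v best with h | h <;> simp [h] <;> try omega
      rw [h1, hv] at *
      omega
    · rw [if_neg hm]
      have hz : ext T n i j = 0 := by
        rw [ext, if_pos (by omega : i < n ∧ 0 ≤ j), if_neg hm]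
      have hrec := ih (j + 1) nxt cur best (by omega) (by omega) hb0 hlen hnxt
        (fun p hp0 hpj => by
          by_cases hpq : p = j
          · rw [hpq, hcur0 j le_rfl, hz]
          · exact hcur p hp0 (by omega))
        (fun p hpj => hcur0 p (by omega))
      refine ⟨?_, hrec.2⟩
      rw [hrec.1, hz]
      have := rowMax_nonneg T n i (j + 1)
      omega

lemma outerB_spec (T : List Int) (n : Int) : ∀ fuel : Nat, ∀ i nxt best,
    (i + 1).toNat = fuel → i < n → 0 ≤ best →
    (∀ p : Int, 0 ≤ p → p < n → pyG nxt p = ext T n (i + 1) p) →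
    outerB T n i nxt best = max best (gridMax T n i) := by
  intro fuel
  induction fuel with
  | zero =>
    intro i nxt best hf hin hb0 hnxt
    rw [outerB, if_neg (by omega : ¬ 0 ≤ i)]
    rw [gridMax, if_neg (by omega : ¬ 0 ≤ i)]
    omega
  | succ f ih =>
    intro i nxt best hf hin hb0 hnxt
    have hi0 : 0 ≤ i := by omega
    rw [outerB, if_pos hi0]
    have hspec := innerB_spec T n i hin (n - 0).toNat 0 nxt (List.replicate n.toNat 0) best
      rfl le_rfl hb0 (by rw [List.length_replicate]; omega) hnxt
      (fun p hp0 hpj => by omega)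
      (fun p hpj => pyG_replicate n.toNat p (by omega))
    rw [gridMax, if_pos hi0]
    have hrec := ih (i - 1) (innerB T nxt n i 0 (List.replicate n.toNat 0) best).1
      (innerB T nxt n i 0 (List.replicate n.toNat 0) best).2 (by omega) (by omega)
      (by rw [hspec.1]; have := rowMax_nonneg T n i 0; omega)
      (fun p hp0 hpn => by rw [show i - 1 + 1 = i from by ring]; exact hspec.2 p hp0 hpn)
    rw [hrec, hspec.1]
    omega

lemma lfrWhile_char (T : List Int) (n : Int) : ∀ fuel : Nat, ∀ len m,
    (n - len).toNat = fuel → 2 ≤ len →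
    lfrWhile T n len m =
      if len < n ∧ len ≤ gridMax T n (n - 1) then min (gridMax T n (n - 1)) (n - 1) else m := by
  intro fuel
  induction fuel with
  | zero =>
    intro len m hf h2
    rw [lfrWhile, if_neg (by omega : ¬ len < n), if_neg (by omega)]
  | succ f ih =>
    intro len m hf h2
    have hln : len < n := by omega
    rw [lfrWhile, if_pos hln]
    by_cases hg : len ≤ gridMax T n (n - 1)
    · have hpair : PairGe T n len := (pairGe_iff_le_grid T n len (by omega)).mpr hg
      obtain ⟨w, hw0, hwn, hcs⟩ := (found_iff_pairGe T n len (by omega)).mpr hpair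
      rw [lfrFor_found T n len (n - len + 1 - 0).toNat 0 m rfl ⟨w, hw0, hwn, hcs⟩]
      rw [ih (len + 1) len (by omega) (by omega)]
      have hmin := gridMax_nonneg T n (n - 1)
      split_ifs with c1 c2 <;> omega
    · have hnf : ¬ ∃ w, (0:Int) ≤ w ∧ w < n - len + 1 ∧
          containsSeq T n (buildSeq T (w + len) w (List.replicate len.toNat 0) 0).1 len = true := by
        intro hex
        exact hg ((pairGe_iff_le_grid T n len (by omega)).mp
          ((found_iff_pairGe T n len (by omega)).mp hex))
      rw [lfrFor_notfound T n len (n - len + 1 - 0).toNat 0 m rfl hnf]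
      rw [ih (len + 1) m (by omega) (by omega)]
      split_ifs with c1 c2 <;> omega

-- ===== VERDICT (by name: the statement is the Claim_ definition above) =====
theorem lookForReverse_spec : Claim_equal_lookForReverse := by
  intro T n _ _
  unfold Spec_lookForReverse lookForReverse lookForReverse_alt
  rw [lfrWhile_char T n (n - 2).toNat 2 0 rfl le_rfl]
  by_cases hn : n < 3
  · rw [if_pos hn, if_neg (by omega : ¬ ((2:Int) < n ∧ 2 ≤ gridMax T n (n - 1)))]
  · rw [if_neg hn]
    have hout : outerB T n (n - 1) (List.replicate n.toNat 0) 0 = gridMax T n (n - 1) := by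
      rw [outerB_spec T n (n - 1 + 1).toNat (n - 1) (List.replicate n.toNat 0) 0 rfl
        (by omega) le_rfl
        (fun p hp0 hpn => by
          rw [pyG_replicate n.toNat p hp0, show n - 1 + 1 = n from by ring, ext,
            if_neg (by omega)])]
      have := gridMax_nonneg T n (n - 1)
      omega
    simp only [hout]
    split_ifs with c1 c2 c2 <;> omega
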